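-- pv_equiv track=rewrite | github.com/mkdidomenic/jarvis-discord-bot | ytsearcher.py | spaces_to_pluses
-- ===== SOURCE A (Python) =====
-- def remove_end_spaces(string):
--     if string[-1] != " ":
--         return string
--     else:
--         return remove_end_spaces(string[:-1])
--
-- def spaces_to_pluses(string):
--     string = remove_end_spaces(string)
--     new_string = ""
--     for c in string:
--         if c == " ":
--             new_string += "+"
--         else:
--             new_string += c
--     return new_string
-- ===== SOURCE B (Python) =====
-- def spaces_to_pluses(string):
--     return string.rstrip(" ").replace(" ", "+")
-- ===== Notes on version B (the rewrite author's own statement) =====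
-- stated objective: idiomatic
-- what changed: Replaced the recursive one-char-at-a-time trailing-space stripper and the character-accumulating += loop by a single expression using str.rstrip(' ') and str.replace; Pre_ excludes empty/all-space inputs, on which A raises IndexError while B returns ''.
-- outside the precondition, e.g. on spaces_to_pluses(' '): A raises IndexError, B returns ''; on spaces_to_pluses(''): A raises IndexError, B returns ''
import Mathlib
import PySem

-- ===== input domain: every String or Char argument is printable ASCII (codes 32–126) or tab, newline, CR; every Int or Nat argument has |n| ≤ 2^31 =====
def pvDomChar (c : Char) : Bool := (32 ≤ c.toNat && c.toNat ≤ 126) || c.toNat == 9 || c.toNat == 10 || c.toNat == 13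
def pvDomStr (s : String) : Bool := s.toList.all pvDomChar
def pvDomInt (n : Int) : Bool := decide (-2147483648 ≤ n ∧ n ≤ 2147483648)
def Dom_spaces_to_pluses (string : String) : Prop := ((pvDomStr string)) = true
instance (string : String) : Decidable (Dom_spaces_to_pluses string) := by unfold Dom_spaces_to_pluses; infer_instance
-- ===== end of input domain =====

-- B replaces the recursive trailing-space stripper and the += accumulation loop by
-- rstrip(" ") + replace(" ", "+"); equivalence is about the return value only.

-- ===== PORT A =====
-- remove_end_spaces: string[-1] = getLast (IndexError on [] — excluded by Pre_),
-- string[:-1] = dropLast.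
def remove_end_spaces (cs : List Char) : List Char :=
  if h : cs = [] then cs          -- Python raises IndexError here; outside Pre_
  else if cs.getLast h ≠ ' ' then cs
  else remove_end_spaces cs.dropLast
termination_by cs.length
decreasing_by
  have : 0 < cs.length := List.length_pos_iff.mpr h
  simp [List.length_dropLast]; omega

def spaces_to_pluses (string : String) : String :=
  String.ofList ((remove_end_spaces string.toList).foldl
    (fun acc c => acc ++ [if c = ' ' then '+' else c]) [])

-- ===== PORT B =====
-- rstrip(" ") ported by hand (PySem has no chars-argument rstrip): drop the ' '
-- prefix of the reversed list — exact for Python's rstrip with the single char " ".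
-- replace(" ", "+") with a one-char pattern is the per-character map.
def spaces_to_pluses_alt (string : String) : String :=
  String.ofList (((string.toList.reverse.dropWhile (· == ' ')).reverse).map
    (fun c => if c == ' ' then '+' else c))

-- ===== PRECONDITION & SPEC =====
-- Pre_ excludes empty and all-space strings, on which A's remove_end_spaces recurses
-- down to the empty string and raises IndexError (B returns "" there).
def Pre_spaces_to_pluses (string : String) : Prop :=
  string.toList.any (fun c => !(c == ' ')) = true
instance (string : String) : Decidable (Pre_spaces_to_pluses string) := by
  unfold Pre_spaces_to_pluses; infer_instance

def pvWitness_spaces_to_pluses : String := "a b "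

def Spec_spaces_to_pluses (string : String) (out : String) : Prop := out = spaces_to_pluses_alt string
instance (string : String) (out : String) : Decidable (Spec_spaces_to_pluses string out) := by unfold Spec_spaces_to_pluses; infer_instance

-- ===== CLAIM (what is proved, stated in full; the proofs are below) =====
def Claim_equal_spaces_to_pluses : Prop := ∀ (string : String), Dom_spaces_to_pluses string → Pre_spaces_to_pluses string → Spec_spaces_to_pluses string (spaces_to_pluses string)

-- ===== LEMMAS AND PROOFS =====

-- A's += loop builds exactly the per-character map.
theorem foldl_append_map (f : Char → Char) :
    ∀ (cs acc : List Char),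
      cs.foldl (fun a c => a ++ [f c]) acc = acc ++ cs.map f := by
  intro cs
  induction cs with
  | nil => simp
  | cons c cs ih => intro acc; simp [List.foldl_cons, ih]

-- A's recursive stripper equals B's reverse/dropWhile/reverse, given a non-space char.
theorem remove_end_spaces_eq :
    ∀ (cs : List Char), (∃ c ∈ cs, c ≠ ' ') →
      remove_end_spaces cs = (cs.reverse.dropWhile (· == ' ')).reverse := by
  intro cs
  fun_induction remove_end_spaces cs
  · intro hx; rcases hx with ⟨c, hc, _⟩; simp at hc
  · rename_i cs h hlast
    intro _
    have hdec : cs = cs.dropLast ++ [cs.getLast h] := (List.dropLast_append_getLast h).symm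
    conv_rhs => rw [hdec]
    simpa [hlast] using hdec
  · rename_i cs h hlast ih
    intro hx
    have hlast' : cs.getLast h = ' ' := by
      by_contra hne; exact hlast hne
    have hdec : cs = cs.dropLast ++ [cs.getLast h] := (List.dropLast_append_getLast h).symm
    have hx' : ∃ c ∈ cs.dropLast, c ≠ ' ' := by
      rcases hx with ⟨c, hc, hne⟩
      refine ⟨c, ?_, hne⟩
      rw [hdec] at hc
      rcases List.mem_append.mp hc with h1 | h1
      · exact h1
      · simp at h1; rw [h1, hlast'] at hne; exact absurd rfl hne
    rw [ih hx']
    conv_rhs => rw [hdec]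
    simp [hlast']

-- ===== VERDICT (by name: the statement is the Claim_ definition above) =====
theorem spaces_to_pluses_spec : Claim_equal_spaces_to_pluses := by
  intro s _ hpre
  unfold Spec_spaces_to_pluses spaces_to_pluses spaces_to_pluses_alt
  have hx : ∃ c ∈ s.toList, c ≠ ' ' := by
    unfold Pre_spaces_to_pluses at hpre
    simp only [List.any_eq_true, Bool.not_eq_eq_eq_not, Bool.not_true, beq_eq_false_iff_ne] at hpre
    exact hpre
  rw [remove_end_spaces_eq s.toList hx, foldl_append_map (fun c => if c = ' ' then '+' else c)]
  simp only [List.nil_append]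
  congr 1
  apply List.map_congr_left
  intro c _
  by_cases hc : c = ' ' <;> simp [hc]
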